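-- pv_equiv track=rewrite | github.com/Mishooto/squareOne_shortCut | dataprocessing2.py | fillDict_collected
-- ===== SOURCE A (Python) =====
-- def fillDict_collected(resultRatiosByFile):
--     preparedDict = prepareResultDict_collected(resultRatiosByFile)
--     for filename in resultRatiosByFile:
--         for source in resultRatiosByFile[filename]:
--             for destination in resultRatiosByFile[filename][source]:
--                 lst_specified = resultRatiosByFile[filename][source][destination]
--                 for j in range(0, len(lst_specified)):
--                     preparedDict[j].append(lst_specified[j])
--     return preparedDict
--
-- def prepareResultDict_collected(resultRatiosByFile):
--     result_dict_by_failureNum = {}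
--     for firstkey in resultRatiosByFile:
--         for src2 in resultRatiosByFile[firstkey]:
--             #result_dict_by_failureNum[src2] = {}
--             for destination2 in resultRatiosByFile[firstkey][src2]:
--                 #result_dict_by_failureNum[src2][destination2] = {}
--                 for i in range(0, len(resultRatiosByFile[firstkey][src2][destination2])):  # noqa: E501
--                     result_dict_by_failureNum[i] = []
--     return result_dict_by_failureNum
-- ===== SOURCE B (Python) =====
-- def fillDict_collected(resultRatiosByFile):
--     # Column-wise transpose: flatten the nested dicts into a flat list of rows,
--     # then bucket j is simply the j-th column of that list, for j up to the
--     # longest row.  No per-element dict bookkeeping at all.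
--     rows = [lst for sources in resultRatiosByFile.values()
--                 for dests in sources.values()
--                 for lst in dests.values()]
--     width = max((len(row) for row in rows), default=0)
--     return {j: [row[j] for row in rows if j < len(row)] for j in range(width)}
-- ===== Notes on version B (the rewrite author's own statement) =====
-- stated objective: alternative
-- what changed: A makes two dict-building passes over the nested structure (create every empty bucket, then append element by element into the bucket for its index); B never builds buckets incrementally: it flattens the nested dicts into a flat list of rows once, computes the maximum row length, and emits bucket j directly as the j-th column of the rows for each j in range(width).
import Mathlib
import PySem

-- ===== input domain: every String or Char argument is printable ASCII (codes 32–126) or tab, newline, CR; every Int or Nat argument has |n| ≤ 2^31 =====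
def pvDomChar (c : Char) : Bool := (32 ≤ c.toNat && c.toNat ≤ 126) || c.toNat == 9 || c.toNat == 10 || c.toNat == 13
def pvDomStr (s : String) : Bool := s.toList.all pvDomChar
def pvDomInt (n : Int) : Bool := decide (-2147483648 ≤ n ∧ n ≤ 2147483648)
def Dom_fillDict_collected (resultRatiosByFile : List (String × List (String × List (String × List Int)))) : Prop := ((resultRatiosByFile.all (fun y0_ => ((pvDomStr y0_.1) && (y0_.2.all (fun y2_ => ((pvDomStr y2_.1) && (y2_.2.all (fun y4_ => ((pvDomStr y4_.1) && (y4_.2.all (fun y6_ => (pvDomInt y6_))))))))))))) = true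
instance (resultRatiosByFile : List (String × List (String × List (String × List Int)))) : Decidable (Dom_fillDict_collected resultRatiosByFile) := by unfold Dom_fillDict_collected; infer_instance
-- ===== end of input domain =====

-- B replaces A's two dict-building passes (prepare empty buckets, then append element
-- by element) with a column-wise transpose of the flattened rows — alternative
-- decomposition, same result.

-- ===== PORT A =====
-- dicts are association lists; 'for k in d: … d[k] …' traverses the items in order
def prepareResultDict_collected (resultRatiosByFile : List (String × List (String × List (String × List Int)))) : PySem.Dict Int (List Int) :=
  resultRatiosByFile.foldl (fun d firstkey =>
    firstkey.2.foldl (fun d src2 =>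
      src2.2.foldl (fun d destination2 =>
        (PySem.List.pyRange 0 (destination2.2.length : Int) 1).foldl
          (fun d i => d.insert i []) d) d) d) PySem.Dict.empty

def fillDict_collected (resultRatiosByFile : List (String × List (String × List (String × List Int)))) : List (Int × List Int) :=
  -- preparedDict[j].append(lst[j]): key j is always present (created by the prepare
  -- pass for every j < len(lst)), so modify with default [] is exact here
  (resultRatiosByFile.foldl (fun d filename =>
    filename.2.foldl (fun d source =>
      source.2.foldl (fun d destination =>
        let lst := destination.2
        (PySem.List.pyRange 0 (lst.length : Int) 1).foldl
          (fun d j => d.modify j [] (fun v => v ++ [PySem.List.pyGetD lst j 0])) d) d) d)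
    (prepareResultDict_collected resultRatiosByFile)).items

-- ===== PORT B =====
def fillDict_collected_alt (resultRatiosByFile : List (String × List (String × List (String × List Int)))) : List (Int × List Int) :=
  -- rows = [lst for sources in … for dests in … for lst in dests.values()]
  let rows := resultRatiosByFile.flatMap (fun sources =>
    sources.2.flatMap (fun dests => dests.2.map (fun p => p.2)))
  -- width = max((len(row) for row in rows), default=0)
  let width := PySem.List.maxD (rows.map (fun row => (row.length : Int))) (fun x => x) 0
  -- {j: [row[j] for row in rows if j < len(row)] for j in range(width)}
  (PySem.List.pyRange 0 width 1).map (fun j =>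
    (j, (rows.filter (fun row => decide (j < (row.length : Int)))).map
          (fun row => PySem.List.pyGetD row j 0)))

-- ===== PRECONDITION & SPEC =====
def Spec_fillDict_collected (resultRatiosByFile : List (String × List (String × List (String × List Int)))) (out : List (Int × List Int)) : Prop := out = fillDict_collected_alt resultRatiosByFile
instance (resultRatiosByFile : List (String × List (String × List (String × List Int)))) (out : List (Int × List Int)) : Decidable (Spec_fillDict_collected resultRatiosByFile out) := by unfold Spec_fillDict_collected; infer_instance

-- ===== CLAIM (what is proved, stated in full; the proofs are below) =====
def Claim_equal_fillDict_collected : Prop := ∀ (resultRatiosByFile : List (String × List (String × List (String × List Int)))), Dom_fillDict_collected resultRatiosByFile → Spec_fillDict_collected resultRatiosByFile (fillDict_collected resultRatiosByFile)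

-- ===== LEMMAS AND PROOFS =====

-- per-list loop bodies of A's two passes
def pvPrepL (d : PySem.Dict Int (List Int)) (L : List Int) : PySem.Dict Int (List Int) :=
  (PySem.List.pyRange 0 (L.length : Int) 1).foldl (fun d i => d.insert i []) d

def pvFillL (d : PySem.Dict Int (List Int)) (L : List Int) : PySem.Dict Int (List Int) :=
  (PySem.List.pyRange 0 (L.length : Int) 1).foldl
    (fun d j => d.modify j [] (fun v => v ++ [PySem.List.pyGetD L j 0])) d

-- the inner Int lists in traversal order (same expression as B's 'rows')
def pvLL (resultRatiosByFile : List (String × List (String × List (String × List Int)))) : List (List Int) :=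
  resultRatiosByFile.flatMap (fun sources =>
    sources.2.flatMap (fun dests => dests.2.map (fun p => p.2)))

-- overall maximum row length
def pvW (LL : List (List Int)) : Int :=
  LL.foldl (fun w L => max w ((L.length : Int))) 0

-- the j-th column of the rows
def pvCol (c : Int) (LL : List (List Int)) : List Int :=
  LL.flatMap (fun L => if 0 ≤ c ∧ c < (L.length : Int) then [PySem.List.pyGetD L c 0] else [])

theorem pv_foldl_flatMap {α β γ : Type} (xs : List α) (f : α → List β) (g : γ → β → γ) (a : γ) :
    (xs.flatMap f).foldl g a = xs.foldl (fun a x => (f x).foldl g a) a := by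
  induction xs generalizing a with
  | nil => rfl
  | cons x xs ih => simp [List.foldl_append, ih]

theorem pv_nested_foldl (rs : List (String × List (String × List (String × List Int))))
    (step : PySem.Dict Int (List Int) → List Int → PySem.Dict Int (List Int))
    (d : PySem.Dict Int (List Int)) :
    rs.foldl (fun d fp => fp.2.foldl (fun d sp => sp.2.foldl (fun d dp => step d dp.2) d) d) d
      = (pvLL rs).foldl step d := by
  simp only [pvLL, pv_foldl_flatMap, List.foldl_map]

-- A's port, rewritten as folds over the flattened list of rows
theorem pvA_flat (rs : List (String × List (String × List (String × List Int)))) :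
    fillDict_collected rs
      = ((pvLL rs).foldl pvFillL ((pvLL rs).foldl pvPrepL PySem.Dict.empty)).items := by
  unfold fillDict_collected prepareResultDict_collected
  rw [← pv_nested_foldl rs pvPrepL, ← pv_nested_foldl rs pvFillL]
  rfl

-- B's max(…, default=0) is the running max pvW
theorem pv_maxD_len (LL : List (List Int)) :
    PySem.List.maxD (LL.map (fun row => (row.length : Int))) (fun x => x) 0 = pvW LL := by
  cases LL with
  | nil => rfl
  | cons L t =>
    simp only [List.map_cons, PySem.List.maxD, PySem.List.max?_id_cons, Option.getD_some,
      pvW, List.foldl_cons, List.foldl_map]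
    have h : max (0 : Int) ((L.length : Int)) = (L.length : Int) := max_eq_right (by positivity)
    rw [h]

-- B's port, with max unfolded
theorem pvB_flat (rs : List (String × List (String × List (String × List Int)))) :
    fillDict_collected_alt rs
      = (PySem.List.pyRange 0 (pvW (pvLL rs)) 1).map (fun j =>
          (j, ((pvLL rs).filter (fun row => decide (j < (row.length : Int)))).map
                (fun row => PySem.List.pyGetD row j 0))) := by
  unfold fillDict_collected_alt
  simp only [pv_maxD_len]
  rfl

-- update of two initial ranges is the initial range of the max
theorem pv_update_range (w l : Int) (hw : 0 ≤ w) :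
    PySem.Set.update (PySem.List.pyRange 0 w 1) (PySem.List.pyRange 0 l 1)
      = PySem.List.pyRange 0 (max w l) 1 := by
  rw [PySem.Set.update_eq_append_filter,
      PySem.Set.ofList_eq_self_of_nodup _ (PySem.List.nodup_pyRange_one 0 l)]
  by_cases h : l ≤ w
  · have hf : (PySem.List.pyRange 0 l 1).filter
        (fun y => !(PySem.Set.contains (PySem.List.pyRange 0 w 1) y)) = [] := by
      rw [List.filter_eq_nil_iff]
      intro a ha
      have hm := PySem.List.mem_pyRange_one.1 ha
      simp [PySem.List.mem_pyRange_one]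
      omega
    rw [hf, List.append_nil, max_eq_left h]
  · push Not at h
    have hsplit := PySem.List.pyRange_one_append 0 w l hw h.le
    rw [hsplit, List.filter_append]
    have hf1 : (PySem.List.pyRange 0 w 1).filter
        (fun y => !(PySem.Set.contains (PySem.List.pyRange 0 w 1) y)) = [] := by
      rw [List.filter_eq_nil_iff]
      intro a ha
      have hm := PySem.List.mem_pyRange_one.1 ha
      simp [PySem.List.mem_pyRange_one]
      omega
    have hf2 : (PySem.List.pyRange w l 1).filter
        (fun y => !(PySem.Set.contains (PySem.List.pyRange 0 w 1) y))
          = PySem.List.pyRange w l 1 := by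
      rw [List.filter_eq_self]
      intro a ha
      have hm := PySem.List.mem_pyRange_one.1 ha
      simp [PySem.List.mem_pyRange_one]
      omega
    rw [hf1, hf2, List.nil_append, ← hsplit, max_eq_right h.le]

-- the key chain of A's passes
def pvKChain (LL : List (List Int)) (s : List Int) : List Int :=
  LL.foldl (fun s L => PySem.Set.update s (PySem.List.pyRange 0 (L.length : Int) 1)) s

theorem pv_kchain_range (LL : List (List Int)) :
    ∀ w : Int, 0 ≤ w →
    pvKChain LL (PySem.List.pyRange 0 w 1)
      = PySem.List.pyRange 0 (LL.foldl (fun w L => max w ((L.length : Int))) w) 1 := by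
  induction LL with
  | nil => intro w _; rfl
  | cons L t ih =>
    intro w hw
    simp only [pvKChain, List.foldl_cons] at *
    rw [pv_update_range w (L.length : Int) hw]
    exact ih (max w (L.length : Int)) (le_trans hw (le_max_left _ _))

theorem pv_foldl_max_fixed (LL : List (List Int)) (t : Int)
    (h : ∀ L ∈ LL, (L.length : Int) ≤ t) :
    LL.foldl (fun w L => max w ((L.length : Int))) t = t := by
  induction LL with
  | nil => rfl
  | cons L t' ih =>
    simp only [List.foldl_cons]
    rw [max_eq_left (h L (by simp))]
    exact ih (fun L' hL' => h L' (by simp [hL']))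

theorem pv_keys_prep (LL : List (List Int)) (d : PySem.Dict Int (List Int)) :
    (LL.foldl pvPrepL d).keys = pvKChain LL d.keys := by
  induction LL generalizing d with
  | nil => rfl
  | cons L LL ih =>
    simp only [List.foldl_cons, pvKChain] at *
    rw [ih]
    congr 1
    exact PySem.Dict.keys_foldl_insert _ _ d

theorem pv_keys_fill (LL : List (List Int)) (d : PySem.Dict Int (List Int)) :
    (LL.foldl pvFillL d).keys = pvKChain LL d.keys := by
  induction LL generalizing d with
  | nil => rfl
  | cons L LL ih =>
    simp only [List.foldl_cons, pvKChain] at *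
    rw [ih]
    congr 1
    exact PySem.Dict.keys_foldl_modify _ _ (fun _ j v => v ++ [PySem.List.pyGetD L j 0]) d

-- every value in the prepare pass stays []
theorem pv_getD_insert_loop (l : List Int) (d : PySem.Dict Int (List Int)) (c : Int)
    (h : ∀ c, d.getD c [] = []) :
    (l.foldl (fun d i => d.insert i ([] : List Int)) d).getD c [] = [] := by
  induction l generalizing d with
  | nil => exact h c
  | cons i l ih =>
    simp only [List.foldl_cons]
    apply ih
    intro c'
    rw [PySem.Dict.getD_insert]
    split_ifs with hc
    · rfl
    · exact h c'

theorem pv_getD_prep (LL : List (List Int)) (d : PySem.Dict Int (List Int))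
    (h : ∀ c, d.getD c [] = []) (c : Int) :
    ((LL.foldl pvPrepL d).getD c []) = [] := by
  induction LL generalizing d with
  | nil => exact h c
  | cons L LL ih =>
    simp only [List.foldl_cons]
    apply ih
    intro c'
    exact pv_getD_insert_loop _ d c' h

-- the fill loop over one row touches bucket c exactly when c indexes the row
theorem pv_filter_range (L : List Int) (c : Int) :
    ((PySem.List.pyRange 0 (L.length : Int) 1).map
        (fun j => (j, PySem.List.pyGetD L j 0))).filter (fun p => p.1 == c)
      = if 0 ≤ c ∧ c < (L.length : Int) then [(c, PySem.List.pyGetD L c 0)] else [] := by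
  rw [List.filter_map]
  have hcomp : ((fun p : Int × Int => p.1 == c) ∘ (fun j => (j, PySem.List.pyGetD L j 0)))
      = fun j => j == c := rfl
  rw [hcomp, List.filter_beq]
  by_cases h : 0 ≤ c ∧ c < (L.length : Int)
  · rw [List.count_eq_one_of_mem (PySem.List.nodup_pyRange_one 0 _)
        (PySem.List.mem_pyRange_one.2 h)]
    simp [h]
  · rw [List.count_eq_zero_of_not_mem (fun hm => h (PySem.List.mem_pyRange_one.1 hm))]
    simp [h]

theorem pv_getD_fillL (d : PySem.Dict Int (List Int)) (L : List Int) (c : Int) :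
    (pvFillL d L).getD c []
      = d.getD c [] ++ (if 0 ≤ c ∧ c < (L.length : Int)
          then [PySem.List.pyGetD L c 0] else []) := by
  have h1 : pvFillL d L
      = ((PySem.List.pyRange 0 (L.length : Int) 1).map
          (fun j => (j, PySem.List.pyGetD L j 0))).foldl
            (fun d p => d.modify p.1 [] (fun v => v ++ [p.2])) d := by
    unfold pvFillL
    rw [List.foldl_map]
  rw [h1, PySem.Dict.getD_foldl_modify_append, pv_filter_range]
  split_ifs <;> simp

theorem pv_getD_fill (LL : List (List Int)) (d : PySem.Dict Int (List Int)) (c : Int) :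
    (LL.foldl pvFillL d).getD c [] = d.getD c [] ++ pvCol c LL := by
  induction LL generalizing d with
  | nil => simp [pvCol]
  | cons L LL ih =>
    simp only [List.foldl_cons, pvCol, List.flatMap_cons] at *
    rw [ih, pv_getD_fillL, List.append_assoc]

-- the column as B computes it (filter then map)
theorem pv_col_eq (c : Int) (hc : 0 ≤ c) (LL : List (List Int)) :
    pvCol c LL = (LL.filter (fun row => decide (c < (row.length : Int)))).map
      (fun row => PySem.List.pyGetD row c 0) := by
  induction LL with
  | nil => rfl
  | cons L LL ih =>
    simp only [pvCol, List.flatMap_cons, List.filter_cons, hc, true_and] at ih ⊢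
    by_cases h : c < (L.length : Int)
    · simp [h, ih]
    · simp [h, ih]

-- ===== VERDICT (by name: the statement is the Claim_ definition above) =====
theorem fillDict_collected_spec : Claim_equal_fillDict_collected := by
  intro rs _
  unfold Spec_fillDict_collected
  rw [pvA_flat, pvB_flat]
  set LL := pvLL rs with hLL
  have hmax := PySem.List.le_foldl_max_int LL (fun L => (L.length : Int)) 0
  have hW0 : 0 ≤ pvW LL := hmax.1
  have hkp : (LL.foldl pvPrepL PySem.Dict.empty).keys = PySem.List.pyRange 0 (pvW LL) 1 := by
    rw [pv_keys_prep]
    have h0 : (PySem.Dict.empty : PySem.Dict Int (List Int)).keys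
        = PySem.List.pyRange 0 0 1 := by
      rw [PySem.List.pyRange_one_eq_nil le_rfl]; simp
    rw [h0, pv_kchain_range LL 0 le_rfl]
    rfl
  have hkeys : (LL.foldl pvFillL (LL.foldl pvPrepL PySem.Dict.empty)).keys
      = PySem.List.pyRange 0 (pvW LL) 1 := by
    rw [pv_keys_fill, hkp, pv_kchain_range LL (pvW LL) hW0,
        pv_foldl_max_fixed LL (pvW LL) hmax.2]
  have hnd : (LL.foldl pvFillL (LL.foldl pvPrepL PySem.Dict.empty)).keys.Nodup := by
    rw [hkeys]; exact PySem.List.nodup_pyRange_one 0 _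
  rw [PySem.Dict.items_eq_map_keys _ hnd [], hkeys]
  apply List.map_congr_left
  intro j hj
  have hj' := PySem.List.mem_pyRange_one.1 hj
  have hv : (LL.foldl pvFillL (LL.foldl pvPrepL PySem.Dict.empty)).getD j []
      = pvCol j LL := by
    rw [pv_getD_fill, pv_getD_prep LL PySem.Dict.empty (fun c => by simp) j, List.nil_append]
  rw [hv, pv_col_eq j hj'.1 LL]
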